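-- pv_equiv track=rewrite | github.com/BRRRARRGH/Kattis | ProgrammingTeam/forestFires/forestFires.py | checkToFire
-- ===== SOURCE A (Python) =====
-- def checkToFire(treeA, treeB, treeTemp):
--     treeTemp[treeA] = 2
--     if(treeA == treeB):
--         return 1
--     try:
--         if(treeTemp[treeA + 100] == 1):
--             if checkToFire(treeA + 100, treeB, treeTemp) == 1:
--                 return 1
--     except IndexError:
--         pass
--     try:
--         if(treeTemp[treeA - 100] == 1):
--             if checkToFire(treeA - 100, treeB, treeTemp) == 1:
--                 return 1
--     except IndexError:
--         pass
--     try: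
--         if(treeTemp[treeA + 1] == 1 and treeA % 100 != 99):
--             if checkToFire(treeA + 1, treeB, treeTemp) == 1:
--                 return 1
--     except IndexError:
--         pass
--     try:
--         if(treeTemp[treeA - 1] == 1 and treeA % 100 != 0):
--             if checkToFire(treeA - 1, treeB, treeTemp) == 1:
--                 return 1
--     except IndexError:
--         pass
--     return 0
-- ===== SOURCE B (Python) =====
-- def checkToFire(treeA, treeB, treeTemp):
--     # Iterative DFS with an explicit stack of (cell, direction-index) frames,
--     # replacing A's recursion (same marking of treeTemp in place, same return value).
--     treeTemp[treeA] = 2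
--     if treeA == treeB:
--         return 1
--     stack = [(treeA, 0)]
--     while stack:
--         cell, d = stack.pop()
--         if d >= 4:
--             continue
--         stack.append((cell, d + 1))
--         nb = (cell + 100, cell - 100, cell + 1, cell - 1)[d]
--         try:
--             ok = treeTemp[nb] == 1 and (d != 2 or cell % 100 != 99) and (d != 3 or cell % 100 != 0)
--         except IndexError:
--             continue
--         if ok:
--             treeTemp[nb] = 2
--             if nb == treeB:
--                 return 1
--             stack.append((nb, 0))
--     return 0
-- ===== Notes on version B (the rewrite author's own statement) =====
-- stated objective: alternative
-- what changed: The recursive DFS is replaced by an iterative explicit-stack loop over (cell, direction-index) frames that tries the directions +100, -100, +1, -1 in A's order with the same guards and in-place marking, so Python's recursion limit is never involved.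
import Mathlib
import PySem

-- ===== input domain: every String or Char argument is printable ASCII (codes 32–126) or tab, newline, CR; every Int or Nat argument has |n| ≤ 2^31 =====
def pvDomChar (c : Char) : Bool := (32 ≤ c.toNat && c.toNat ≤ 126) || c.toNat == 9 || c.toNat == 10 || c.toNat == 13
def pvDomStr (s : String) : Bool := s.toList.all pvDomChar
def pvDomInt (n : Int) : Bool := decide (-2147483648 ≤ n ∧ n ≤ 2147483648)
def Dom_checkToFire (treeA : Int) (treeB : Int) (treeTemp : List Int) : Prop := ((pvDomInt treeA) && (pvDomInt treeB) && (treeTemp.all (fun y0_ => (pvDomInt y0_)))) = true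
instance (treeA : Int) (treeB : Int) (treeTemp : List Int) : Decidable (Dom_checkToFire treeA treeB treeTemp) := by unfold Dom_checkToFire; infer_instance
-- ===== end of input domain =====

-- B replaces A's recursive DFS by an explicit-stack iteration (same in-place marking
-- of treeTemp, same visiting order, same return value); the equivalence proved here
-- is about the RETURN value — both Pythons mutate treeTemp identically.

-- number of cells currently equal to 1 (fuel bound for A's port / termination
-- measure for B's loop: every step that recurses/pushes turns a 1-cell into 2)
def pvOnes (g : List Int) : Nat := g.countP (fun x => x == 1)

theorem pvOnes_set_lt : ∀ (g : List Int) (k : Nat), g[k]? = some 1 → pvOnes (g.set k 2) < pvOnes g := by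
  intro g
  induction g with
  | nil => intro k h; simp at h
  | cons x t ih =>
    intro k h
    cases k with
    | zero => simp at h; subst h; simp [pvOnes]
    | succ k =>
      simp at h
      have := ih k h
      simp [pvOnes, List.countP_cons] at *
      omega

theorem pvOnes_mark_lt (g : List Int) (i : Int)
    (h : PySem.List.pyGet? g i = some 1) :
    pvOnes (PySem.List.pySetD g i 2) < pvOnes g := by
  unfold PySem.List.pyGet? at h
  unfold PySem.List.pySetD PySem.List.pySet?
  cases hk : PySem.List.pyIdx? g.length i with
  | none => rw [hk] at h; simp at h
  | some k =>
    rw [hk] at h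
    simp at h ⊢
    exact pvOnes_set_lt g k h

-- ===== PORT A =====
-- one try-block of A: if the guarded sub-search returned 1, return 1,
-- otherwise continue with the updated forest
def pvBlock (p : Int × List Int) (rest : List Int → Int × List Int) : Int × List Int :=
  if p.1 = (1 : Int) then (1, p.2) else rest p.2

-- literal transliteration of A's recursive DFS; Python's unbounded recursion is made
-- total with a fuel argument (pvOnes treeTemp + 1 calls suffice: each recursive call
-- is guarded by "the target cell holds 1" and immediately overwrites it with 2)
def pvGoA : Nat → Int → Int → List Int → Int × List Int
  | 0, _, _, g => (0, g)                                   -- fuel guard, never reached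
  | (f+1), treeA, treeB, g =>
    let g0 := PySem.List.pySetD g treeA 2                   -- treeTemp[treeA] = 2
    if treeA = treeB then (1, g0)
    else
      -- try: if treeTemp[treeA + 100] == 1 …  except IndexError: pass
      pvBlock (match PySem.List.pyGet? g0 (treeA + 100) with
          | some v => if v = 1 then pvGoA f (treeA + 100) treeB g0 else (0, g0)
          | none => (0, g0)) (fun g1 =>
      -- try: if treeTemp[treeA - 100] == 1 …
      pvBlock (match PySem.List.pyGet? g1 (treeA - 100) with
          | some v => if v = 1 then pvGoA f (treeA - 100) treeB g1 else (0, g1)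
          | none => (0, g1)) (fun g2 =>
      -- try: if treeTemp[treeA + 1] == 1 and treeA % 100 != 99 …
      pvBlock (match PySem.List.pyGet? g2 (treeA + 1) with
          | some v => if v = 1 ∧ PySem.Int.mod treeA 100 ≠ 99 then pvGoA f (treeA + 1) treeB g2 else (0, g2)
          | none => (0, g2)) (fun g3 =>
      -- try: if treeTemp[treeA - 1] == 1 and treeA % 100 != 0 …
      pvBlock (match PySem.List.pyGet? g3 (treeA - 1) with
          | some v => if v = 1 ∧ PySem.Int.mod treeA 100 ≠ 0 then pvGoA f (treeA - 1) treeB g3 else (0, g3)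
          | none => (0, g3)) (fun g4 => (0, g4)))))

def checkToFire (treeA : Int) (treeB : Int) (treeTemp : List Int) : Int :=
  (pvGoA (pvOnes treeTemp + 1) treeA treeB treeTemp).1

-- ===== PORT B =====
-- neighbour in direction d (0: +100, 1: -100, 2: +1, 3: -1), Source B's tuple lookup
def pvDir (d : Nat) (cell : Int) : Int :=
  match d with
  | 0 => cell + 100
  | 1 => cell - 100
  | 2 => cell + 1
  | _ => cell - 1

-- Source B's `ok`: the read succeeds with a 1 and the modulo checks pass
-- (a failing read, Python's IndexError → continue, makes it false)
def pvGuard (d : Nat) (cell : Int) (g : List Int) : Bool :=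
  (PySem.List.pyGet? g (pvDir d cell) == some 1) &&
    (d != 2 || PySem.Int.mod cell 100 != 99) && (d != 3 || PySem.Int.mod cell 100 != 0)

theorem pvGuard_get {d : Nat} {cell : Int} {g : List Int} (h : pvGuard d cell g = true) :
    PySem.List.pyGet? g (pvDir d cell) = some 1 := by
  simp [pvGuard] at h
  exact h.1.1

-- Source B's while-loop over the explicit stack of (cell, direction-index) frames
def pvLoopB (treeB : Int) (stack : List (Int × Nat)) (g : List Int) : Int :=
  match stack with
  | [] => 0
  | (cell, d) :: s =>
    if 4 ≤ d then pvLoopB treeB s g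
    else if h : pvGuard d cell g then
      if pvDir d cell = treeB then 1
      else pvLoopB treeB ((pvDir d cell, 0) :: (cell, d + 1) :: s) (PySem.List.pySetD g (pvDir d cell) 2)
    else pvLoopB treeB ((cell, d + 1) :: s) g
termination_by pvOnes g * 6 + ((stack.map (fun p => 5 - p.2)).sum) + stack.length
decreasing_by
  · simp; omega
  · have := pvOnes_mark_lt g (pvDir d cell) (pvGuard_get h)
    simp; omega
  · simp; omega

def checkToFire_alt (treeA : Int) (treeB : Int) (treeTemp : List Int) : Int :=
  let g0 := PySem.List.pySetD treeTemp treeA 2    -- treeTemp[treeA] = 2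
  if treeA = treeB then 1
  else pvLoopB treeB [(treeA, 0)] g0

-- ===== PRECONDITION & SPEC =====
-- Pre_ excludes exactly the inputs on which A raises: treeA outside Python's index
-- range for treeTemp, where A's first statement treeTemp[treeA] = 2 raises
-- IndexError (B raises identically there).
def Pre_checkToFire (treeA : Int) (treeB : Int) (treeTemp : List Int) : Prop :=
  PySem.Raise.InRange treeTemp.length treeA
instance (treeA : Int) (treeB : Int) (treeTemp : List Int) : Decidable (Pre_checkToFire treeA treeB treeTemp) := by
  unfold Pre_checkToFire; infer_instance

def pvWitness_checkToFire : Int × Int × List Int := (0, 2, [2, 1, 1])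

def Spec_checkToFire (treeA : Int) (treeB : Int) (treeTemp : List Int) (out : Int) : Prop := out = checkToFire_alt treeA treeB treeTemp
instance (treeA : Int) (treeB : Int) (treeTemp : List Int) (out : Int) : Decidable (Spec_checkToFire treeA treeB treeTemp out) := by unfold Spec_checkToFire; infer_instance

-- ===== CLAIM (what is proved, stated in full; the proofs are below) =====
def Claim_equal_checkToFire : Prop := ∀ (treeA : Int) (treeB : Int) (treeTemp : List Int), Dom_checkToFire treeA treeB treeTemp → Pre_checkToFire treeA treeB treeTemp → Spec_checkToFire treeA treeB treeTemp (checkToFire treeA treeB treeTemp)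

-- ===== LEMMAS AND PROOFS =====

theorem pvOnes_set_le : ∀ (g : List Int) (k : Nat), pvOnes (g.set k 2) ≤ pvOnes g := by
  intro g
  induction g with
  | nil => intro k; simp
  | cons x t ih =>
    intro k
    cases k with
    | zero => simp [pvOnes, List.countP_cons]
    | succ k => have := ih k; simp [pvOnes, List.countP_cons] at *; omega

theorem pvOnes_mark_le (g : List Int) (i : Int) :
    pvOnes (PySem.List.pySetD g i 2) ≤ pvOnes g := by
  unfold PySem.List.pySetD PySem.List.pySet?
  cases hk : PySem.List.pyIdx? g.length i with
  | none => simp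
  | some k => simp; exact pvOnes_set_le g k

-- A's four try-blocks from direction d on, as one function over the direction
-- index; f is the fuel each sibling call of pvGoA (f+1) receives
def pvTryA (f : Nat) (treeB : Int) (a : Int) (g : List Int) (d : Nat) : Int × List Int :=
  if 4 ≤ d then (0, g)
  else
    let p := if pvGuard d a g then pvGoA f (pvDir d a) treeB g else (0, g)
    if p.1 = (1 : Int) then (1, p.2) else pvTryA f treeB a p.2 (d + 1)
termination_by 4 - d
decreasing_by omega

-- A's try-block shapes, re-expressed through pvGuard (one lemma per direction)
theorem pvB0 {β : Type} (a : Int) (g : List Int) (x y : β) :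
    (match PySem.List.pyGet? g (a + 100) with
      | some v => if v = 1 then x else y
      | none => y) = if pvGuard 0 a g then x else y := by
  cases h : PySem.List.pyGet? g (a + 100) with
  | none => simp [pvGuard, pvDir, h]
  | some v =>
    by_cases hv : v = (1 : Int) <;> simp [pvGuard, pvDir, h, hv]

theorem pvB1 {β : Type} (a : Int) (g : List Int) (x y : β) :
    (match PySem.List.pyGet? g (a - 100) with
      | some v => if v = 1 then x else y
      | none => y) = if pvGuard 1 a g then x else y := by
  cases h : PySem.List.pyGet? g (a - 100) with
  | none => simp [pvGuard, pvDir, h]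
  | some v =>
    by_cases hv : v = (1 : Int) <;> simp [pvGuard, pvDir, h, hv]

theorem pvB2 {β : Type} (a : Int) (g : List Int) (x y : β) :
    (match PySem.List.pyGet? g (a + 1) with
      | some v => if v = 1 ∧ PySem.Int.mod a 100 ≠ 99 then x else y
      | none => y) = if pvGuard 2 a g then x else y := by
  cases h : PySem.List.pyGet? g (a + 1) with
  | none => simp [pvGuard, pvDir, h]
  | some v =>
    by_cases hv : v = (1 : Int) <;> simp [pvGuard, pvDir, h, hv]

theorem pvB3 {β : Type} (a : Int) (g : List Int) (x y : β) :
    (match PySem.List.pyGet? g (a - 1) with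
      | some v => if v = 1 ∧ PySem.Int.mod a 100 ≠ 0 then x else y
      | none => y) = if pvGuard 3 a g then x else y := by
  cases h : PySem.List.pyGet? g (a - 1) with
  | none => simp [pvGuard, pvDir, h]
  | some v =>
    by_cases hv : v = (1 : Int) <;> simp [pvGuard, pvDir, h, hv]

-- one step of the correspondence: a pvGuard-ed block followed by the rest of the
-- chain is the chain from direction d
theorem pvStep (f : Nat) (b a : Int) (g : List Int) (d : Nat) (hd : d < 4) (nb : Int)
    (hnb : pvDir d a = nb) (rest : List Int → Int × List Int)
    (hrest : ∀ g', rest g' = pvTryA f b a g' (d + 1)) :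
    pvBlock (if pvGuard d a g then pvGoA f nb b g else (0, g)) rest = pvTryA f b a g d := by
  subst hnb
  rw [pvTryA.eq_def, if_neg (by omega : ¬ 4 ≤ d)]
  unfold pvBlock
  simp only [hrest]

-- one unfolding of A's body, phrased as the try-chain
theorem pvGoA_eq (f : Nat) (a b : Int) (g : List Int) :
    pvGoA (f + 1) a b g =
      (let g0 := PySem.List.pySetD g a 2
       if a = b then (1, g0) else pvTryA f b a g0 0) := by
  by_cases hab : a = b
  · simp [pvGoA, hab]
  · simp only [pvGoA, if_neg hab, pvB0, pvB1, pvB2, pvB3]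
    refine pvStep f b a _ 0 (by omega) _ rfl _ ?_
    intro g1
    refine pvStep f b a _ 1 (by omega) _ rfl _ ?_
    intro g2
    refine pvStep f b a _ 2 (by omega) _ rfl _ ?_
    intro g3
    refine pvStep f b a _ 3 (by omega) _ rfl _ ?_
    intro g4
    rw [pvTryA.eq_def]
    norm_num

-- results of the try-chain are 0 or 1
theorem pvTryA_01 (f : Nat) (b a : Int) :
    ∀ k d (g : List Int), 4 - d ≤ k → (pvTryA f b a g d).1 = 0 ∨ (pvTryA f b a g d).1 = 1 := by
  intro k
  induction k with
  | zero =>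
    intro d g h
    have hd : 4 ≤ d := by omega
    rw [pvTryA.eq_def]
    simp [hd]
  | succ k ih =>
    intro d g h
    by_cases hd : 4 ≤ d
    · rw [pvTryA.eq_def]; simp [hd]
    · rw [pvTryA.eq_def]
      simp only [if_neg hd]
      by_cases hg : pvGuard d a g = true
      · simp only [if_pos hg]
        by_cases hp : (pvGoA f (pvDir d a) b g).1 = (1 : Int)
        · simp [hp]
        · simp only [if_neg hp]
          exact ih (d + 1) _ (by omega)
      · simp only [if_neg hg]
        norm_num
        exact ih (d + 1) _ (by omega)

-- monotonicity: running A never increases the number of 1-cells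
theorem pvGoA_mono : ∀ f (a b : Int) (g : List Int),
    pvOnes (PySem.List.pySetD g a 2) < f →
    pvOnes (pvGoA f a b g).2 ≤ pvOnes (PySem.List.pySetD g a 2) := by
  intro f
  induction f using Nat.strong_induction_on with
  | _ f IH =>
    intro a b g hlt
    match f, hlt with
    | f' + 1, hlt =>
      rw [pvGoA_eq]
      by_cases hab : a = b
      · simp [hab]
      · simp only [if_neg hab]
        have hle0 : pvOnes (PySem.List.pySetD g a 2) ≤ f' := by omega
        -- try-chain monotonicity, by induction over the remaining directions
        suffices hch : ∀ k d (g' : List Int), 4 - d ≤ k → pvOnes g' ≤ f' →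
            pvOnes (pvTryA f' b a g' d).2 ≤ pvOnes g' by
          exact hch 4 0 _ (by omega) hle0
        intro k
        induction k with
        | zero =>
          intro d g' hk hle
          have hd : 4 ≤ d := by omega
          rw [pvTryA.eq_def]; simp [hd]
        | succ k ihk =>
          intro d g' hk hle
          by_cases hd : 4 ≤ d
          · rw [pvTryA.eq_def]; simp [hd]
          · rw [pvTryA.eq_def]
            simp only [if_neg hd]
            by_cases hg : pvGuard d a g' = true
            · simp only [if_pos hg]
              have hm : pvOnes (PySem.List.pySetD g' (pvDir d a) 2) < pvOnes g' :=
                pvOnes_mark_lt g' (pvDir d a) (pvGuard_get hg)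
              have hrec : pvOnes (pvGoA f' (pvDir d a) b g').2 ≤
                  pvOnes (PySem.List.pySetD g' (pvDir d a) 2) :=
                IH f' (by omega) (pvDir d a) b g' (by omega)
              by_cases hp : (pvGoA f' (pvDir d a) b g').1 = (1 : Int)
              · simp only [if_pos hp]
                simpa using le_trans hrec (le_of_lt hm)
              · simp only [if_neg hp]
                have := ihk (d + 1) (pvGoA f' (pvDir d a) b g').2 (by omega) (by omega)
                omega
            · simp only [if_neg hg]
              norm_num
              exact ihk (d + 1) g' (by omega) hle

theorem pvTryA_mono (f : Nat) (b a : Int) :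
    ∀ k d (g : List Int), 4 - d ≤ k → pvOnes g ≤ f →
    pvOnes (pvTryA f b a g d).2 ≤ pvOnes g := by
  intro k
  induction k with
  | zero =>
    intro d g hk hle
    have hd : 4 ≤ d := by omega
    rw [pvTryA.eq_def]; simp [hd]
  | succ k ihk =>
    intro d g hk hle
    by_cases hd : 4 ≤ d
    · rw [pvTryA.eq_def]; simp [hd]
    · rw [pvTryA.eq_def]
      simp only [if_neg hd]
      by_cases hg : pvGuard d a g = true
      · simp only [if_pos hg]
        have hm : pvOnes (PySem.List.pySetD g (pvDir d a) 2) < pvOnes g :=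
          pvOnes_mark_lt g (pvDir d a) (pvGuard_get hg)
        have hrec : pvOnes (pvGoA f (pvDir d a) b g).2 ≤
            pvOnes (PySem.List.pySetD g (pvDir d a) 2) :=
          pvGoA_mono f (pvDir d a) b g (by omega)
        by_cases hp : (pvGoA f (pvDir d a) b g).1 = (1 : Int)
        · simp only [if_pos hp]
          simpa using le_trans hrec (le_of_lt hm)
        · simp only [if_neg hp]
          have := ihk (d + 1) (pvGoA f (pvDir d a) b g).2 (by omega) (by omega)
          omega
      · simp only [if_neg hg]
        norm_num
        exact ihk (d + 1) g (by omega) hle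

-- the bridge: B's stack loop runs A's try-chain frame by frame
theorem pvBridge : ∀ N f (b a : Int) (d : Nat) (g : List Int) (s : List (Int × Nat)),
    pvOnes g * 5 + (4 - d) ≤ N → pvOnes g ≤ f →
    pvLoopB b ((a, d) :: s) g =
      (if (pvTryA f b a g d).1 = 1 then 1 else pvLoopB b s (pvTryA f b a g d).2) := by
  intro N
  induction N using Nat.strong_induction_on with
  | _ N IH =>
    intro f b a d g s hN hf
    by_cases hd : 4 ≤ d
    · rw [pvLoopB.eq_def, pvTryA.eq_def]
      simp [hd]
    · by_cases hg : pvGuard d a g = true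
      · -- guard passes: B marks and (maybe) pushes; A recurses
        have hm : pvOnes (PySem.List.pySetD g (pvDir d a) 2) < pvOnes g :=
          pvOnes_mark_lt g (pvDir d a) (pvGuard_get hg)
        obtain ⟨f', rfl⟩ : ∃ f', f = f' + 1 := ⟨f - 1, by omega⟩
        rw [pvLoopB.eq_def, pvTryA.eq_def]
        simp only [if_neg hd, dif_pos hg, if_pos hg]
        rw [pvGoA_eq]
        by_cases hnb : pvDir d a = b
        · simp [hnb]
        · simp only [if_neg hnb]
          have hq2 : pvOnes (pvTryA f' b (pvDir d a) (PySem.List.pySetD g (pvDir d a) 2) 0).2 ≤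
              pvOnes (PySem.List.pySetD g (pvDir d a) 2) :=
            pvTryA_mono f' b (pvDir d a) 4 0 _ (by omega) (by omega)
          have step1 : pvLoopB b ((pvDir d a, 0) :: (a, d + 1) :: s) (PySem.List.pySetD g (pvDir d a) 2) =
              (if (pvTryA f' b (pvDir d a) (PySem.List.pySetD g (pvDir d a) 2) 0).1 = 1 then 1
               else pvLoopB b ((a, d + 1) :: s) (pvTryA f' b (pvDir d a) (PySem.List.pySetD g (pvDir d a) 2) 0).2) :=
            IH (N - 1) (by omega) f' b (pvDir d a) 0 _ ((a, d + 1) :: s) (by omega) (by omega)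
          rw [step1]
          by_cases hq1 : (pvTryA f' b (pvDir d a) (PySem.List.pySetD g (pvDir d a) 2) 0).1 = (1 : Int)
          · simp [hq1]
          · simp only [if_neg hq1]
            rw [IH (N - 1) (by omega) (f' + 1) b a (d + 1) _ s (by omega) (by omega)]
      · -- guard fails (bad read or modulo check): both move to the next direction
        rw [pvLoopB.eq_def, pvTryA.eq_def]
        simp only [if_neg hd, dif_neg hg, if_neg hg]
        norm_num
        rw [IH (N - 1) (by omega) f b a (d + 1) g s (by omega) hf]

-- ===== VERDICT (by name: the statement is the Claim_ definition above) =====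
theorem checkToFire_spec : Claim_equal_checkToFire := by
  unfold Claim_equal_checkToFire
  intro a b t hDom hPre
  show checkToFire a b t = checkToFire_alt a b t
  unfold checkToFire checkToFire_alt
  rw [pvGoA_eq]
  by_cases hab : a = b
  · simp [hab]
  · simp only [if_neg hab]
    have hfuel : pvOnes (PySem.List.pySetD t a 2) ≤ pvOnes t := pvOnes_mark_le t a
    rw [pvBridge (pvOnes (PySem.List.pySetD t a 2) * 5 + 4) (pvOnes t) b a 0
      (PySem.List.pySetD t a 2) [] (by omega) hfuel]
    rcases pvTryA_01 (pvOnes t) b a 4 0 (PySem.List.pySetD t a 2) (by omega) with h | h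
    · rw [pvLoopB.eq_def]
      simp [h]
    · simp [h]
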